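-- pv_equiv track=rewrite | github.com/zgotter/algorithm-python | programmers/고득점Kit/완전탐색/모의고사_02_ok.py | solution
-- ===== SOURCE A (Python) =====
-- def solution(answers):
--     answer = []
--     ps = [
--         [1, 2, 3, 4, 5],
--         [2, 1, 2, 3, 2, 4, 2, 5],
--         [3, 3, 1, 1, 2, 2, 4, 4, 5, 5]
--     ]
--     ans = [[p[i%len(p)] for i in range(len(answers))] for p in ps]
--     for i, a in enumerate(ans):
--         answer.append((i+1, sum([a1 == a2 for a1, a2 in zip(a, answers)])))
--     max_cnt = max([ans[1] for ans in answer])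
--     answer = sorted([ans[0] for ans in answer if ans[1] == max_cnt])
--     return answer
-- ===== SOURCE B (Python) =====
-- def solution(answers):
--     ps = [
--         [1, 2, 3, 4, 5],
--         [2, 1, 2, 3, 2, 4, 2, 5],
--         [3, 3, 1, 1, 2, 2, 4, 4, 5, 5]
--     ]
--     # All three patterns are periodic with period dividing 40, so bucket the
--     # answers by index mod 40 into 40 value-histograms; each pattern's score
--     # is then read off the 120 histogram cells without touching answers again.
--     hist = [dict() for _ in range(40)]
--     for i, a in enumerate(answers):
--         d = hist[i % 40]
--         d[a] = d.get(a, 0) + 1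
--     counts = [sum(hist[j].get(p[j % len(p)], 0) for j in range(40)) for p in ps]
--     m = max(counts)
--     return [k + 1 for k in range(3) if counts[k] == m]
-- ===== Notes on version B (the rewrite author's own statement) =====
-- stated objective: alternative
-- what changed: B replaces A's three materialized length-n predicted-answer lists and zipped comparisons by a bucketed histogram: one pass over answers fills 40 value-counters keyed by index mod 40 (the lcm of the pattern periods), after which each pattern's score is read off 40 histogram cells with no further scan of answers; the result list is emitted already in order, so no sort is needed.
import Mathlib
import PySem

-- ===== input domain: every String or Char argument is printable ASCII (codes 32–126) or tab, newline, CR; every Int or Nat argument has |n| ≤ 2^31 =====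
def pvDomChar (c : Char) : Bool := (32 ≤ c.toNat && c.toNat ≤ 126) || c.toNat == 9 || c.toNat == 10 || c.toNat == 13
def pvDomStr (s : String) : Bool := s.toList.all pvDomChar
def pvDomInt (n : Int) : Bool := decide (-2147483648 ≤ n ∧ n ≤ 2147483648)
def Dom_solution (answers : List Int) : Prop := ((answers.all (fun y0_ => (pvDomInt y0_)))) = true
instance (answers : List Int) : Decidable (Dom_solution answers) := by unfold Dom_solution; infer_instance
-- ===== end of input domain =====

-- B buckets the answers by index mod 40 (the lcm of the three pattern periods) into 40
-- value-histograms in one pass, then reads each pattern's score off the histogram cells;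
-- no predicted-answer lists, no zipped comparison lists, no sort (alternative algorithm).

-- ===== PORT A =====
-- indices fed to pyGetD are i % len(p) with p nonempty, hence always in range
def solution (answers : List Int) : List Int :=
  let ps : List (List Int) :=
    [[1, 2, 3, 4, 5],
     [2, 1, 2, 3, 2, 4, 2, 5],
     [3, 3, 1, 1, 2, 2, 4, 4, 5, 5]]
  let ans : List (List Int) :=
    ps.map (fun p =>
      (PySem.List.pyRange 0 (answers.length : Int) 1).map
        (fun i => PySem.List.pyGetD p (PySem.Int.mod i (p.length : Int)) 0))
  let answer : List (Int × Int) :=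
    (PySem.List.enumerate ans 0).foldl
      (fun acc ia =>
        acc ++ [(ia.1 + 1,
                 ((ia.2.zip answers).map
                   (fun q => if q.1 = q.2 then (1 : Int) else 0)).foldl (· + ·) 0)]) []
  let max_cnt : Int := ((PySem.List.max? (answer.map (·.2)) (fun y => y)).getD 0)
  PySem.List.sorted ((answer.filter (fun a => a.2 = max_cnt)).map (·.1)) (fun x => x) false

-- ===== PORT B =====
-- Source B's filling loop: one pass over answers, bumping the counter for value a
-- in the histogram bucket i % 40
def buildHist : List Int → Nat → List (PySem.Dict Int Int) → List (PySem.Dict Int Int)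
  | [], _, h => h
  | a :: rest, i, h =>
      let d := h.getD (i % 40) PySem.Dict.empty
      buildHist rest (i + 1) (h.set (i % 40) (d.insert a (d.getD a 0 + 1)))

-- Source B's scoring sum: sum(hist[j].get(p[j % len(p)], 0) for j in range(40))
def patScore (p : List Int) (hist : List (PySem.Dict Int Int)) : Int :=
  ((List.range 40).map
    (fun j => (hist.getD j PySem.Dict.empty).getD (p.getD (j % p.length) 0) 0)).foldl (· + ·) 0

def solution_alt (answers : List Int) : List Int :=
  let p1 : List Int := [1, 2, 3, 4, 5]
  let p2 : List Int := [2, 1, 2, 3, 2, 4, 2, 5]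
  let p3 : List Int := [3, 3, 1, 1, 2, 2, 4, 4, 5, 5]
  let hist := buildHist answers 0 (List.replicate 40 PySem.Dict.empty)
  let c1 := patScore p1 hist
  let c2 := patScore p2 hist
  let c3 := patScore p3 hist
  let m : Int := max c1 (max c2 c3)
  (if c1 = m then [(1 : Int)] else []) ++
  (if c2 = m then [(2 : Int)] else []) ++
  (if c3 = m then [(3 : Int)] else [])

-- ===== PRECONDITION & SPEC =====
def Spec_solution (answers : List Int) (out : List Int) : Prop := out = solution_alt answers
instance (answers : List Int) (out : List Int) : Decidable (Spec_solution answers out) := by unfold Spec_solution; infer_instance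

-- ===== CLAIM (what is proved, stated in full; the proofs are below) =====
def Claim_equal_solution : Prop := ∀ (answers : List Int), Dom_solution answers → Spec_solution answers (solution answers)

-- ===== LEMMAS AND PROOFS =====

-- the match count of a single cyclic pattern against ys starting at index i
def cnt (p : List Int) : Nat → List Int → Int
  | _, [] => 0
  | i, a :: rest => (if a = p.getD (i % p.length) 0 then 1 else 0) + cnt p (i + 1) rest

-- structural-recursion form of the scoring sum: bucket j contributes its count for key κ j
def scoreL (κ : Nat → Int) : List (PySem.Dict Int Int) → Nat → Int
  | [], _ => 0
  | d :: hs, j => d.getD (κ j) 0 + scoreL κ hs (j + 1)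

theorem buildHist_length (ys : List Int) :
    ∀ (i : Nat) (hs : List (PySem.Dict Int Int)),
      (buildHist ys i hs).length = hs.length := by
  induction ys with
  | nil => intro i hs; simp [buildHist]
  | cons a rest ih => intro i hs; simp [buildHist, ih]

theorem foldl_range_scoreL (hs : List (PySem.Dict Int Int)) (κ : Nat → Int) :
    ∀ (j : Nat) (c : Int),
      ((List.range hs.length).map
        (fun t => (hs.getD t PySem.Dict.empty).getD (κ (j + t)) 0)).foldl (· + ·) c =
      c + scoreL κ hs j := by
  induction hs with
  | nil => intro j c; simp [scoreL]
  | cons d hs ih =>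
      intro j c
      simp only [List.length_cons]
      rw [List.range_succ_eq_map]
      simp only [List.map_cons, List.map_map, List.foldl_cons, scoreL]
      have hmap : ((List.range hs.length).map
            ((fun t => ((d :: hs).getD t PySem.Dict.empty).getD (κ (j + t)) 0) ∘ Nat.succ)) =
          ((List.range hs.length).map
            (fun t => (hs.getD t PySem.Dict.empty).getD (κ ((j + 1) + t)) 0)) := by
        apply List.map_congr_left
        intro t _
        simp only [Function.comp, List.getD_cons_succ]
        rw [show j + Nat.succ t = (j + 1) + t by omega]
      rw [hmap, ih]
      simp only [Nat.add_zero, List.getD_cons_zero]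
      ring

theorem scoreL_set (κ : Nat → Int) (a : Int) :
    ∀ (hs : List (PySem.Dict Int Int)) (r j : Nat), r < hs.length →
      scoreL κ (hs.set r ((hs.getD r PySem.Dict.empty).insert a
          ((hs.getD r PySem.Dict.empty).getD a 0 + 1))) j =
      scoreL κ hs j + (if a = κ (j + r) then 1 else 0) := by
  intro hs
  induction hs with
  | nil => intro r j h; simp at h
  | cons d hs ih =>
      intro r j h
      cases r with
      | zero =>
          simp only [List.getD_cons_zero, List.set_cons_zero, scoreL, Nat.add_zero]
          by_cases hk : a = κ j
          · simp only [if_pos hk]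
            simp only [← hk, PySem.Dict.getD_insert_self]
            ring
          · rw [PySem.Dict.getD_insert_of_ne d _ _ (fun he => hk he.symm), if_neg hk]
            ring
      | succ r =>
          simp only [List.getD_cons_succ, List.set_cons_succ, scoreL]
          rw [ih r (j + 1) (by simpa using h)]
          rw [show (j + 1) + r = j + (r + 1) by omega]
          ring

theorem buildHist_scoreL (p : List Int) (hdvd : p.length ∣ 40) (ys : List Int) :
    ∀ (i : Nat) (hs : List (PySem.Dict Int Int)), hs.length = 40 →
      scoreL (fun j => p.getD (j % p.length) 0) (buildHist ys i hs) 0 =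
      scoreL (fun j => p.getD (j % p.length) 0) hs 0 + cnt p i ys := by
  induction ys with
  | nil => intro i hs _; simp [buildHist, cnt]
  | cons a rest ih =>
      intro i hs hlen
      simp only [buildHist]
      rw [ih (i + 1) _ (by simp [hlen])]
      rw [scoreL_set (fun j => p.getD (j % p.length) 0) a hs (i % 40) 0
            (by rw [hlen]; exact Nat.mod_lt _ (by norm_num))]
      simp only [Nat.zero_add, cnt]
      rw [Nat.mod_mod_of_dvd i hdvd]
      ring

theorem scoreL_replicate (κ : Nat → Int) :
    ∀ (n j : Nat), scoreL κ (List.replicate n PySem.Dict.empty) j = 0 := by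
  intro n
  induction n with
  | zero => intro j; simp [scoreL]
  | succ n ih => intro j; simp [List.replicate_succ, scoreL, ih, PySem.Dict.getD_empty]

theorem patScore_build (p : List Int) (hdvd : p.length ∣ 40) (ys : List Int) :
    patScore p (buildHist ys 0 (List.replicate 40 PySem.Dict.empty)) = cnt p 0 ys := by
  unfold patScore
  have hlen : (buildHist ys 0 (List.replicate 40 PySem.Dict.empty)).length = 40 := by
    rw [buildHist_length]; simp
  rw [show List.range 40 = List.range (buildHist ys 0 (List.replicate 40 PySem.Dict.empty)).length from by rw [hlen]]
  have := foldl_range_scoreL (buildHist ys 0 (List.replicate 40 PySem.Dict.empty))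
      (fun j => p.getD (j % p.length) 0) 0 0
  simp only [Nat.zero_add] at this
  rw [this, buildHist_scoreL p hdvd ys 0 _ (by simp), scoreL_replicate]
  ring

-- A-side: the per-pattern zipped-comparison sum equals cnt
theorem sumA_eq_cnt (p : List Int) (ys : List Int) :
    ∀ (i : Nat) (c : Int),
      (((((List.range ys.length).map (fun j => p.getD ((i + j) % p.length) 0)).zip ys).map
          (fun q => if q.1 = q.2 then (1 : Int) else 0)).foldl (· + ·) c) =
        c + cnt p i ys := by
  induction ys with
  | nil => intro i c; simp [cnt]
  | cons a rest ih =>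
      intro i c
      simp only [List.length_cons]
      rw [List.range_succ_eq_map]
      simp only [List.map_cons, List.map_map, List.zip_cons_cons, List.foldl_cons, cnt]
      have hmap : ((List.range rest.length).map
            ((fun j => p.getD ((i + j) % p.length) 0) ∘ Nat.succ)) =
          ((List.range rest.length).map (fun j => p.getD ((i + 1 + j) % p.length) 0)) := by
        apply List.map_congr_left
        intro j _
        simp only [Function.comp]
        rw [show i + 1 + j = i + Nat.succ j by omega]
      rw [hmap, ih]
      have : ((if p.getD (i % p.length) 0 = a then (1 : Int) else 0)) =
          (if a = p.getD (i % p.length) 0 then (1 : Int) else 0) := by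
        split_ifs with h1 h2 <;> simp_all [eq_comm]
      simp only [Nat.add_zero] at *
      rw [this]
      ring

-- A's predicted list for pattern p equals the range-map used in sumA_eq_cnt (at i = 0)
theorem predList_eq (p : List Int) (hp : p ≠ []) (n : Nat) :
    (PySem.List.pyRange 0 (n : Int) 1).map
        (fun i => PySem.List.pyGetD p (PySem.Int.mod i (p.length : Int)) 0) =
      (List.range n).map (fun j => p.getD ((0 + j) % p.length) 0) := by
  have hL : 0 < p.length := List.length_pos_iff.mpr hp
  rw [PySem.List.pyRange_one]
  simp only [sub_zero, Int.toNat_natCast, List.map_map]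
  apply List.map_congr_left
  intro j hj
  simp only [Function.comp, zero_add]
  have hmod : PySem.Int.mod (j : Int) (p.length : Int) = ((j % p.length : Nat) : Int) := by
    simp [PySem.Int.mod, Int.fmod_eq_emod]
    try omega
  rw [hmod, PySem.List.pyGetD_natCast]

-- ===== VERDICT (by name: the statement is the Claim_ definition above) =====
theorem solution_spec : Claim_equal_solution := by
  intro answers _
  unfold Spec_solution solution solution_alt
  simp only [List.map_cons, List.map_nil, PySem.List.enumerate_cons, PySem.List.enumerate_nil,
    List.foldl_cons, List.foldl_nil, List.nil_append]
  simp only [predList_eq [1,2,3,4,5] (by decide), predList_eq [2,1,2,3,2,4,2,5] (by decide),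
      predList_eq [3,3,1,1,2,2,4,4,5,5] (by decide)]
  simp only [sumA_eq_cnt]
  simp only [patScore_build [1,2,3,4,5] (by norm_num), patScore_build [2,1,2,3,2,4,2,5] (by norm_num),
      patScore_build [3,3,1,1,2,2,4,4,5,5] (by norm_num)]
  set c1 := cnt [1,2,3,4,5] 0 answers with hc1
  set c2 := cnt [2,1,2,3,2,4,2,5] 0 answers with hc2
  set c3 := cnt [3,3,1,1,2,2,4,4,5,5] 0 answers with hc3
  simp only [List.map_cons, zero_add, List.cons_append]
  rw [PySem.List.max?_id_cons]
  simp only [Option.getD_some]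
  set m := max (max c1 c2) c3 with hm
  have hm' : max c1 (max c2 c3) = m := by rw [hm]; exact (max_assoc c1 c2 c3).symm
  rw [hm']
  have hone : c1 = m ∨ c2 = m ∨ c3 = m := by
    rw [hm]; rcases le_total c1 c2 with h | h <;> rcases le_total c2 c3 with h' | h' <;>
      simp [max_def] <;> omega
  have hle1 : c1 ≤ m := by rw [hm]; exact le_max_of_le_left (le_max_left _ _)
  have hle2 : c2 ≤ m := by rw [hm]; exact le_max_of_le_left (le_max_right _ _)
  have hle3 : c3 ≤ m := by rw [hm]; exact le_max_right _ _
  simp only [List.filter_cons, decide_eq_true_eq]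
  by_cases h1 : c1 = m <;> by_cases h2 : c2 = m <;> by_cases h3 : c3 = m <;>
    simp [h1, h2, h3, hle1, hle2, hle3] <;>
    first
    | decide
    | (exact absurd hone (by tauto))
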